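-- pv_equiv track=rewrite | github.com/ad-str/huge-leetcode-guy | Graphs/CountSubgraphs.py | countSubgraphs
-- ===== SOURCE A (Python) =====
-- def countSubgraphs(adj: dict[int, list]) -> list:
--     # Key observation: you can pick up the graph at any point and treat it as the
--     # root of a tree (since acyclic).
--     # One possible method is to pick an arbitrary point as the root and count the number
--     # of subtrees. However, there are two main issues with this method:
--     # 1. We need to loop over all possible roots? do we?
--     # 2. We need to take into account cases like {1-2-3} rooted at 2 and
--     # {1-2-3} rooted at 1. Need to treat them as the same.
--
--     visited = set()
--     def dfs(node):
--         res = 1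
--         for child in adj[node]:
--             if child not in visited:
--                 visited.add(child)
--                 res *= 1 + dfs(child)
--         return res + 1
--
--     visited.add(0)
--     return dfs(0)
-- ===== SOURCE B (Python) =====
-- def countSubgraphs(adj: dict[int, list]) -> list:
--     # Iterative explicit-stack post-order DFS: each frame holds
--     # [node, its child list (fetched once, as in a recursive entry), next child
--     # index, running product]; when a frame is exhausted its value (product+1)
--     # is folded into its parent's product; the root's value is returned.
--     visited = {0}
--     stack = [[0, adj[0], 0, 1]]
--     while True:
--         frame = stack[-1]
--         node, children, i, res = frame
--         if i < len(children):
--             frame[2] = i + 1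
--             c = children[i]
--             if c not in visited:
--                 visited.add(c)
--                 stack.append([c, adj[c], 0, 1])
--         else:
--             stack.pop()
--             value = res + 1
--             if not stack:
--                 return value
--             stack[-1][3] *= 1 + value
-- ===== Notes on version B (the rewrite author's own statement) =====
-- stated objective: alternative
-- what changed: A's recursive dfs closure (call stack + shared visited set) is replaced by an explicit-stack iterative post-order traversal whose frames carry (node, remaining children, running product) and fold each finished subtree's value into its parent's product.
import Mathlib
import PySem

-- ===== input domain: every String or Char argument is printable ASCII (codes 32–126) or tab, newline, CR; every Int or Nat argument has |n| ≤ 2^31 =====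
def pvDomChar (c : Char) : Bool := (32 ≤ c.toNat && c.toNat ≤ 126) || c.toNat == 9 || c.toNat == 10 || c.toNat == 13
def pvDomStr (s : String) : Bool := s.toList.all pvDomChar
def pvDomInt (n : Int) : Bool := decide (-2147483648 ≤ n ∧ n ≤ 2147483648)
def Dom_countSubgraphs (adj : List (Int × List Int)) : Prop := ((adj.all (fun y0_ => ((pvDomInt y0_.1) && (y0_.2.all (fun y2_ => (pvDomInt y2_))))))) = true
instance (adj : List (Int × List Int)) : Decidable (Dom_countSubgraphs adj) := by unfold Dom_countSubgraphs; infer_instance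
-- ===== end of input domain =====

-- B replaces A's recursive closure-based DFS by an explicit-stack iterative
-- post-order traversal (same traversal order, same products); return values only.

-- adj[n] as a total function; under Pre_ every looked-up key is present
-- (a missing key is a Python KeyError, excluded by Pre_countSubgraphs).
def adjGet (adj : List (Int × List Int)) (n : Int) : List Int :=
  PySem.Dict.getD (PySem.Dict.mk adj) n []

-- total number of child entries in adj
def adjSize (adj : List (Int × List Int)) : Nat :=
  (adj.map (fun p => p.2.length)).sum

-- ===== PORT A =====
-- the 'for child in adj[node]' loop of dfs: res accumulator, shared visited set
def dfsGo (dfsRec : Int → PySem.Set Int → Option (Int × PySem.Set Int)) :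
    List Int → Int → PySem.Set Int → Option (Int × PySem.Set Int)
  | [], res, v => some (res + 1, v)
  | c :: cs, res, v =>
    if PySem.Set.contains v c then dfsGo dfsRec cs res v
    else
      match dfsRec c (PySem.Set.add v c) with
      | none => none
      | some (d, v1) => dfsGo dfsRec cs (res * (1 + d)) v1

-- dfs with fuel totalizing the recursion; fuel (adjSize adj + 2) always
-- suffices (lemma dfsA_total below), so the 'none' branch is unreachable
def dfsA (adj : List (Int × List Int)) : Nat → Int → PySem.Set Int → Option (Int × PySem.Set Int)
  | 0, _, _ => none
  | f + 1, n, v => dfsGo (dfsA adj f) (adjGet adj n) 1 v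

def countSubgraphs (adj : List (Int × List Int)) : Int :=
  match dfsA adj (adjSize adj + 2) 0 (PySem.Set.add PySem.Set.empty 0) with
  | some (r, _) => r
  | none => 0

-- ===== PORT B =====
-- explicit stack of frames (node, remaining children, running product);
-- fuel totalizes Source B's 'while True' loop (large enough, see the proofs)
def runB (adj : List (Int × List Int)) :
    Nat → List (Int × List Int × Int) → PySem.Set Int → Option Int
  | 0, _, _ => none
  | f + 1, stack, v =>
    match stack with
    | [] => none
    | (_, [], r) :: rest =>
      match rest with
      | [] => some (r + 1)
      | (p, pcs, pr) :: rest' => runB adj f ((p, pcs, pr * (1 + (r + 1))) :: rest') v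
    | (n, c :: cs, r) :: rest =>
      if PySem.Set.contains v c then runB adj f ((n, cs, r) :: rest) v
      else runB adj f ((c, adjGet adj c, 1) :: (n, cs, r) :: rest) (PySem.Set.add v c)

def countSubgraphs_alt (adj : List (Int × List Int)) : Int :=
  (runB adj ((adjSize adj + 3) ^ (adjSize adj + 2))
    [(0, adjGet adj 0, 1)] (PySem.Set.ofList [0])).getD 0

-- ===== PRECONDITION & SPEC =====
-- one step of reachability: add every child of an already reached node
def preStep (adj : List (Int × List Int)) (s : PySem.Set Int) : PySem.Set Int :=
  PySem.Set.update s (s.flatMap (fun n => adjGet adj n))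

-- all nodes reachable from 0 (iterating adjSize+2 times saturates)
def preReach (adj : List (Int × List Int)) : PySem.Set Int :=
  (preStep adj)^[adjSize adj + 2] (PySem.Set.ofList [0])

-- Pre_: every node reachable from 0 is a key of adj — exactly the inputs on
-- which A's DFS never indexes a missing key, i.e. A returns without KeyError.
def Pre_countSubgraphs (adj : List (Int × List Int)) : Prop :=
  ∀ c ∈ preReach adj, (PySem.Dict.get? (PySem.Dict.mk adj) c).isSome = true

instance (adj : List (Int × List Int)) : Decidable (Pre_countSubgraphs adj) := by
  unfold Pre_countSubgraphs; infer_instance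

def pvWitness_countSubgraphs : (List (Int × List Int)) := [(0, [1, 2]), (1, [0]), (2, [])]

def Spec_countSubgraphs (adj : List (Int × List Int)) (out : Int) : Prop := out = countSubgraphs_alt adj
instance (adj : List (Int × List Int)) (out : Int) : Decidable (Spec_countSubgraphs adj out) := by unfold Spec_countSubgraphs; infer_instance

-- ===== CLAIM (what is proved, stated in full; the proofs are below) =====
def Claim_equal_countSubgraphs : Prop := ∀ (adj : List (Int × List Int)), Dom_countSubgraphs adj → Pre_countSubgraphs adj → Spec_countSubgraphs adj (countSubgraphs adj)

-- ===== LEMMAS AND PROOFS =====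

-- every child list returned by adjGet is one of adj's value lists
theorem adjGet_cases (adj : List (Int × List Int)) (n : Int) :
    adjGet adj n = [] ∨ ∃ p ∈ adj, adjGet adj n = p.2 := by
  induction adj with
  | nil => left; rfl
  | cons q t ih =>
    obtain ⟨a, b⟩ := q
    by_cases h : (a == n) = true
    · right
      refine ⟨(a, b), List.mem_cons_self, ?_⟩
      simp [adjGet, PySem.Dict.getD_eq_get?_getD, PySem.Dict.get?_mk_cons, h]
    · have : adjGet ((a, b) :: t) n = adjGet t n := by
        simp [adjGet, PySem.Dict.getD_eq_get?_getD, PySem.Dict.get?_mk_cons, h]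
      rw [this]
      rcases ih with h' | ⟨p, hp, h'⟩
      · left; exact h'
      · right; exact ⟨p, List.mem_cons_of_mem _ hp, h'⟩

theorem mem_adjGet (adj : List (Int × List Int)) (n c : Int)
    (h : c ∈ adjGet adj n) : c ∈ adj.flatMap (fun p => p.2) := by
  rcases adjGet_cases adj n with h' | ⟨p, hp, h'⟩
  · rw [h'] at h; cases h
  · rw [h'] at h
    exact List.mem_flatMap.2 ⟨p, hp, h⟩

theorem length_adjGet_le (adj : List (Int × List Int)) (n : Int) :
    (adjGet adj n).length ≤ adjSize adj := by
  rcases adjGet_cases adj n with h' | ⟨p, hp, h'⟩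
  · simp [h']
  · rw [h']
    exact List.single_le_sum (by simp) _ (List.mem_map.2 ⟨p, hp, rfl⟩)

theorem length_flatMap_eq (adj : List (Int × List Int)) :
    (adj.flatMap (fun p => p.2)).length = adjSize adj := by
  simp [adjSize, List.length_flatMap]

-- Set facts
theorem set_contains_iff {v : PySem.Set Int} {x : Int} :
    PySem.Set.contains v x = true ↔ x ∈ v := by
  simp [PySem.Set.contains]

theorem set_add_of_not_contains {v : PySem.Set Int} {x : Int}
    (h : PySem.Set.contains v x = false) : PySem.Set.add v x = v ++ [x] := by
  have h' : ¬ (PySem.Set.contains v x = true) := by rw [h]; simp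
  unfold PySem.Set.add
  rw [if_neg h']

-- unfolding helpers for the two loop bodies
theorem not_contains_prop {v : PySem.Set Int} {c : Int}
    (hc : PySem.Set.contains v c = false) : ¬ (PySem.Set.contains v c = true) := by
  rw [hc]; simp

theorem dfsGo_cons_mem (dfsRec : Int → PySem.Set Int → Option (Int × PySem.Set Int))
    (cs : List Int) (res : Int) (v : PySem.Set Int) (c : Int)
    (hc : PySem.Set.contains v c = true) :
    dfsGo dfsRec (c :: cs) res v = dfsGo dfsRec cs res v := by
  simp only [dfsGo]; rw [if_pos hc]

theorem dfsGo_cons_not_mem (dfsRec : Int → PySem.Set Int → Option (Int × PySem.Set Int))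
    (cs : List Int) (res : Int) (v : PySem.Set Int) (c : Int)
    (hc : PySem.Set.contains v c = false) :
    dfsGo dfsRec (c :: cs) res v
      = match dfsRec c (PySem.Set.add v c) with
        | none => none
        | some (d, v1) => dfsGo dfsRec cs (res * (1 + d)) v1 := by
  simp only [dfsGo]; rw [if_neg (not_contains_prop hc)]

theorem dfsA_succ (adj : List (Int × List Int)) (f : Nat) (n : Int) (v : PySem.Set Int) :
    dfsA adj (f + 1) n v = dfsGo (dfsA adj f) (adjGet adj n) 1 v := rfl

theorem runB_skip (adj : List (Int × List Int)) (f : Nat) (n c : Int) (cs : List Int)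
    (r : Int) (rest : List (Int × List Int × Int)) (v : PySem.Set Int)
    (hc : PySem.Set.contains v c = true) :
    runB adj (f + 1) ((n, c :: cs, r) :: rest) v = runB adj f ((n, cs, r) :: rest) v := by
  simp only [runB]; rw [if_pos hc]

theorem runB_push (adj : List (Int × List Int)) (f : Nat) (n c : Int) (cs : List Int)
    (r : Int) (rest : List (Int × List Int × Int)) (v : PySem.Set Int)
    (hc : PySem.Set.contains v c = false) :
    runB adj (f + 1) ((n, c :: cs, r) :: rest) v
      = runB adj f ((c, adjGet adj c, 1) :: (n, cs, r) :: rest) (PySem.Set.add v c) := by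
  simp only [runB]; rw [if_neg (not_contains_prop hc)]

theorem runB_pop (adj : List (Int × List Int)) (f : Nat) (n p : Int) (pcs : List Int)
    (r pr : Int) (rest : List (Int × List Int × Int)) (v : PySem.Set Int) :
    runB adj (f + 1) ((n, [], r) :: (p, pcs, pr) :: rest) v
      = runB adj f ((p, pcs, pr * (1 + (r + 1))) :: rest) v := rfl

theorem runB_root (adj : List (Int × List Int)) (f : Nat) (n : Int) (r : Int)
    (v : PySem.Set Int) :
    runB adj (f + 1) [(n, [], r)] v = some (r + 1) := rfl

-- a Nodup list inside a universe list is no longer than the universe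
theorem nodup_length_le {v u : List Int} (hnd : v.Nodup) (hsub : ∀ x ∈ v, x ∈ u) :
    v.length ≤ u.length := by
  calc v.length = v.toFinset.card := (List.toFinset_card_of_nodup hnd).symm
    _ ≤ u.toFinset.card := Finset.card_le_card (by
        intro x hx
        exact List.mem_toFinset.2 (hsub x (List.mem_toFinset.1 hx)))
    _ ≤ u.length := u.toFinset_card_le

-- SUFFICIENCY: with fuel ≥ adjSize + 2 - |visited|, dfsA never runs out
theorem dfsA_total (adj : List (Int × List Int)) :
    ∀ f n (v : PySem.Set Int), v.Nodup →
      (∀ x ∈ v, x ∈ (0 : Int) :: adj.flatMap (fun p => p.2)) →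
      adjSize adj + 2 ≤ v.length + f →
      ∃ r v', dfsA adj f n v = some (r, v') ∧ v'.Nodup ∧
        (∀ x ∈ v', x ∈ (0 : Int) :: adj.flatMap (fun p => p.2)) ∧
        v.length ≤ v'.length := by
  intro f
  induction f with
  | zero =>
    intro n v hnd hu hlen
    exfalso
    have h1 : v.length ≤ ((0 : Int) :: adj.flatMap (fun p => p.2)).length :=
      nodup_length_le hnd hu
    rw [List.length_cons, length_flatMap_eq] at h1
    omega
  | succ f ih =>
    intro n v hnd hu hlen
    have hcs : ∀ c ∈ adjGet adj n, c ∈ (0 : Int) :: adj.flatMap (fun p => p.2) :=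
      fun c hc => List.mem_cons_of_mem _ (mem_adjGet adj n c hc)
    -- inner induction over the child list
    suffices h : ∀ (cs : List Int), (∀ c ∈ cs, c ∈ (0 : Int) :: adj.flatMap (fun p => p.2)) →
        ∀ res (v : PySem.Set Int), v.Nodup →
        (∀ x ∈ v, x ∈ (0 : Int) :: adj.flatMap (fun p => p.2)) →
        adjSize adj + 2 ≤ v.length + f + 1 →
        ∃ r v', dfsGo (dfsA adj f) cs res v = some (r, v') ∧ v'.Nodup ∧
          (∀ x ∈ v', x ∈ (0 : Int) :: adj.flatMap (fun p => p.2)) ∧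
          v.length ≤ v'.length by
      obtain ⟨r, v', hgo, h1, h2, h3⟩ := h (adjGet adj n) hcs 1 v hnd hu (by omega)
      exact ⟨r, v', by rw [dfsA_succ]; exact hgo, h1, h2, h3⟩
    intro cs
    induction cs with
    | nil =>
      intro _ res v hnd hu _
      exact ⟨res + 1, v, rfl, hnd, hu, le_refl _⟩
    | cons c cs ihcs =>
      intro hcsu res v hnd hu hlen
      by_cases hc : PySem.Set.contains v c = true
      · obtain ⟨r, v', hgo, h1, h2, h3⟩ :=
          ihcs (fun x hx => hcsu x (List.mem_cons_of_mem _ hx)) res v hnd hu hlen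
        exact ⟨r, v', by rw [dfsGo_cons_mem _ _ _ _ _ hc]; exact hgo, h1, h2, h3⟩
      · have hc' : PySem.Set.contains v c = false := by simpa using hc
        have hadd : PySem.Set.add v c = v ++ [c] := set_add_of_not_contains hc'
        have hcmem : c ∉ v := by
          intro hmem
          rw [← set_contains_iff] at hmem
          rw [hc'] at hmem
          cases hmem
        have hndadd : (PySem.Set.add v c).Nodup := by
          rw [hadd]
          refine List.Nodup.append hnd (List.nodup_singleton c) ?_
          intro x hx hx'
          rw [List.mem_singleton] at hx'
          subst hx'
          exact hcmem hx
        have huadd : ∀ x ∈ PySem.Set.add v c, x ∈ (0 : Int) :: adj.flatMap (fun p => p.2) := by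
          intro x hx
          rw [hadd, List.mem_append, List.mem_singleton] at hx
          rcases hx with hx | hx
          · exact hu x hx
          · subst hx; exact hcsu _ List.mem_cons_self
        have hlenadd : (PySem.Set.add v c).length = v.length + 1 := by
          rw [hadd]; simp
        obtain ⟨d, v1, hdfs, h1, h2, h3⟩ :=
          ih c (PySem.Set.add v c) hndadd huadd (by omega)
        obtain ⟨r, v', hgo, h1', h2', h3'⟩ :=
          ihcs (fun x hx => hcsu x (List.mem_cons_of_mem _ hx)) (res * (1 + d)) v1 h1 h2
            (by omega)
        refine ⟨r, v', ?_, h1', h2', by omega⟩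
        rw [dfsGo_cons_not_mem _ _ _ _ _ hc', hdfs]
        exact hgo

-- SIMULATION: whenever the recursive dfs loop finishes, the stack machine,
-- given k extra fuel (k bounded), reaches the corresponding finished frame
theorem sim (adj : List (Int × List Int)) :
    ∀ f (cs : List Int) (res : Int) (v : PySem.Set Int) (r : Int) (v' : PySem.Set Int),
      dfsGo (dfsA adj f) cs res v = some (r, v') →
      ∀ (n : Int) (rest : List (Int × List Int × Int)),
      ∃ k, k ≤ (adjSize adj + 3) ^ f * (cs.length + 1) ∧
        ∀ fb, runB adj (k + fb) ((n, cs, res) :: rest) v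
              = runB adj fb ((n, ([] : List Int), r - 1) :: rest) v' := by
  intro f
  induction f using Nat.strong_induction_on with
  | _ f IHf =>
    intro cs
    induction cs with
    | nil =>
      intro res v r v' h n rest
      simp only [dfsGo, Option.some.injEq, Prod.mk.injEq] at h
      obtain ⟨hr, hv⟩ := h
      subst hv
      refine ⟨0, by simp, ?_⟩
      intro fb
      have : r - 1 = res := by omega
      rw [this]
      simp
    | cons c cs ihcs =>
      intro res v r v' h n rest
      by_cases hc : PySem.Set.contains v c = true
      · rw [dfsGo_cons_mem _ _ _ _ _ hc] at h
        obtain ⟨k, hk, hrun⟩ := ihcs res v r v' h n rest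
        refine ⟨k + 1, ?_, ?_⟩
        · have h1 : 1 ≤ (adjSize adj + 3) ^ f := Nat.one_le_pow _ _ (by omega)
          have h2 : (adjSize adj + 3) ^ f * (cs.length + 1) + (adjSize adj + 3) ^ f
              = (adjSize adj + 3) ^ f * ((c :: cs).length + 1) := by
            rw [List.length_cons]; ring
          omega
        · intro fb
          have : k + 1 + fb = (k + fb) + 1 := by omega
          rw [this, runB_skip _ _ _ _ _ _ _ _ hc]
          exact hrun fb
      · have hc' : PySem.Set.contains v c = false := by simpa using hc
        rw [dfsGo_cons_not_mem _ _ _ _ _ hc'] at h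
        rcases hdfs : dfsA adj f c (PySem.Set.add v c) with _ | ⟨d, v1⟩
        · rw [hdfs] at h; cases h
        · rw [hdfs] at h
          -- f must be positive, and dfsA unfolds to a dfsGo at level f - 1
          rcases f with _ | f'
          · cases hdfs
          have hdfs' : dfsGo (dfsA adj f') (adjGet adj c) 1 (PySem.Set.add v c)
              = some (d, v1) := by rw [← dfsA_succ]; exact hdfs
          obtain ⟨k1, hk1, hrun1⟩ :=
            IHf f' (by omega) (adjGet adj c) 1 (PySem.Set.add v c) d v1 hdfs' c
              ((n, cs, res) :: rest)
          obtain ⟨k2, hk2, hrun2⟩ := ihcs (res * (1 + d)) v1 r v' h n rest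
          refine ⟨1 + k1 + 1 + k2, ?_, ?_⟩
          · have hS : (adjGet adj c).length ≤ adjSize adj := length_adjGet_le adj c
            have h1 : 1 ≤ (adjSize adj + 3) ^ f' := Nat.one_le_pow _ _ (by omega)
            have hk1' : k1 ≤ (adjSize adj + 3) ^ f' * (adjSize adj + 1) :=
              le_trans hk1 (Nat.mul_le_mul_left _ (by omega))
            have hsucc : (adjSize adj + 3) ^ (f' + 1)
                = (adjSize adj + 3) ^ f' * (adjSize adj + 3) := by ring
            have hcons : (adjSize adj + 3) ^ (f' + 1) * ((c :: cs).length + 1)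
                = (adjSize adj + 3) ^ (f' + 1) * (cs.length + 1) + (adjSize adj + 3) ^ (f' + 1) := by
              rw [List.length_cons]; ring
            -- 2 + k1 ≤ M^(f'+1), k2 ≤ M^(f'+1)*(cs.length+1)
            have : 2 + k1 ≤ (adjSize adj + 3) ^ (f' + 1) := by
              rw [hsucc]
              have : (adjSize adj + 3) ^ f' * (adjSize adj + 1) + 2 * (adjSize adj + 3) ^ f'
                  = (adjSize adj + 3) ^ f' * (adjSize adj + 3) := by ring
              omega
            omega
          · intro fb
            have e1 : 1 + k1 + 1 + k2 + fb = (k1 + (1 + k2 + fb)) + 1 := by omega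
            rw [e1, runB_push _ _ _ _ _ _ _ _ hc']
            rw [hrun1 (1 + k2 + fb)]
            have e2 : 1 + k2 + fb = (k2 + fb) + 1 := by omega
            rw [e2, runB_pop]
            have e3 : res * (1 + (d - 1 + 1)) = res * (1 + d) := by ring_nf
            rw [e3]
            exact hrun2 fb

-- ===== VERDICT (by name: the statement is the Claim_ definition above) =====
theorem countSubgraphs_spec : Claim_equal_countSubgraphs := by
  unfold Claim_equal_countSubgraphs
  intro adj _ _
  unfold Spec_countSubgraphs
  -- A's dfs finishes: fuel adjSize+2 suffices
  have hv0nd : (PySem.Set.add PySem.Set.empty (0 : Int)).Nodup := by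
    simp [PySem.Set.add, PySem.Set.empty, PySem.Set.contains]
  have hv0u : ∀ x ∈ PySem.Set.add PySem.Set.empty (0 : Int),
      x ∈ (0 : Int) :: adj.flatMap (fun p => p.2) := by
    intro x hx
    simp [PySem.Set.add, PySem.Set.empty, PySem.Set.contains] at hx
    simp [hx]
  have hv0len : (PySem.Set.add PySem.Set.empty (0 : Int)).length = 1 := by
    simp [PySem.Set.add, PySem.Set.empty, PySem.Set.contains]
  obtain ⟨r, v', hA, _, _, _⟩ :=
    dfsA_total adj (adjSize adj + 2) 0 (PySem.Set.add PySem.Set.empty 0) hv0nd hv0u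
      (by omega)
  have hAval : countSubgraphs adj = r := by
    unfold countSubgraphs
    rw [hA]
  -- unfold the top dfsA call into its dfsGo loop
  have hgo : dfsGo (dfsA adj (adjSize adj + 1)) (adjGet adj 0) 1
      (PySem.Set.add PySem.Set.empty 0) = some (r, v') := by
    rw [← dfsA_succ]; exact hA
  obtain ⟨k, hk, hrun⟩ := sim adj (adjSize adj + 1) (adjGet adj 0) 1
    (PySem.Set.add PySem.Set.empty 0) r v' hgo 0 []
  -- the machine's fuel is at least k + 1
  have hfuel : k + 1 ≤ (adjSize adj + 3) ^ (adjSize adj + 2) := by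
    have hS : (adjGet adj 0).length ≤ adjSize adj := length_adjGet_le adj 0
    have h1 : 1 ≤ (adjSize adj + 3) ^ (adjSize adj + 1) := Nat.one_le_pow _ _ (by omega)
    have hk' : k ≤ (adjSize adj + 3) ^ (adjSize adj + 1) * (adjSize adj + 1) :=
      le_trans hk (Nat.mul_le_mul_left _ (by omega))
    have hsucc : (adjSize adj + 3) ^ (adjSize adj + 2)
        = (adjSize adj + 3) ^ (adjSize adj + 1) * (adjSize adj + 3) := by ring
    have : (adjSize adj + 3) ^ (adjSize adj + 1) * (adjSize adj + 1)
        + 2 * (adjSize adj + 3) ^ (adjSize adj + 1)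
        = (adjSize adj + 3) ^ (adjSize adj + 1) * (adjSize adj + 3) := by ring
    omega
  have hv0eq : PySem.Set.ofList [(0 : Int)] = PySem.Set.add PySem.Set.empty 0 := rfl
  have hrun' := hrun ((adjSize adj + 3) ^ (adjSize adj + 2) - k)
  rw [show k + ((adjSize adj + 3) ^ (adjSize adj + 2) - k)
      = (adjSize adj + 3) ^ (adjSize adj + 2) by omega] at hrun'
  obtain ⟨fb', hfb'⟩ : ∃ fb', (adjSize adj + 3) ^ (adjSize adj + 2) - k = fb' + 1 :=
    ⟨(adjSize adj + 3) ^ (adjSize adj + 2) - k - 1, by omega⟩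
  rw [hfb', runB_root] at hrun'
  unfold countSubgraphs_alt
  rw [hv0eq, hrun']
  simp only [Option.getD_some]
  rw [hAval]
  omega
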